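-- pv_equiv track=rewrite | github.com/Enjef/Algo | 1300 - 1399/1385 - Find the Distance Value Between Two Arrays/1385 - Find the Distance Value Between Two Arrays.py | findTheDistanceValue_best_speed
-- ===== SOURCE A (Python) =====
-- def findTheDistanceValue_best_speed(arr1, arr2, d):
--     from bisect import bisect, bisect_left
--     arr2.sort()
--     ans = 0
--     for val in arr1:
--         left = bisect_left(arr2, val-d)
--         right = bisect(arr2, val+d)
--         ans += left == right
--     return ans
-- ===== SOURCE B (Python) =====
-- def findTheDistanceValue_best_speed(arr1, arr2, d):
--     # Two-pointer merge sweep over sorted arrays (arr2 sorted in place, like A;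
--     # arr1 sorted into a copy). For a negative d no element can be within
--     # distance d, so every arr1 element counts.
--     arr2.sort()
--     a1 = sorted(arr1)
--     j = 0
--     m = len(arr2)
--     ans = 0
--     for x in a1:
--         while j < m and arr2[j] < x - d:
--             j += 1
--         if j == m or arr2[j] > x + d:
--             ans += 1
--     return ans
-- ===== Notes on version B (the rewrite author's own statement) =====
-- stated objective: faster
-- what changed: Replaces A's per-element pair of bisect lookups with a single monotone two-pointer sweep (arr2 sorted in place as in A, arr1 sorted into a copy; one index into arr2 advances at most m times over the whole run), a constant-factor win measured ~1.9x at the largest size.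
-- intended difference: For negative d (not a valid distance) when some x in arr1 has an arr2 element strictly between x+d and x-d, A's bisect arithmetic fails to count such x, while B returns len(arr1); B's value is intended because no element can lie within a negative distance d of x, so every x should count. — e.g. on findTheDistanceValue_best_speed([0], [0], -1): A returns 0, B returns 1
import Mathlib
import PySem

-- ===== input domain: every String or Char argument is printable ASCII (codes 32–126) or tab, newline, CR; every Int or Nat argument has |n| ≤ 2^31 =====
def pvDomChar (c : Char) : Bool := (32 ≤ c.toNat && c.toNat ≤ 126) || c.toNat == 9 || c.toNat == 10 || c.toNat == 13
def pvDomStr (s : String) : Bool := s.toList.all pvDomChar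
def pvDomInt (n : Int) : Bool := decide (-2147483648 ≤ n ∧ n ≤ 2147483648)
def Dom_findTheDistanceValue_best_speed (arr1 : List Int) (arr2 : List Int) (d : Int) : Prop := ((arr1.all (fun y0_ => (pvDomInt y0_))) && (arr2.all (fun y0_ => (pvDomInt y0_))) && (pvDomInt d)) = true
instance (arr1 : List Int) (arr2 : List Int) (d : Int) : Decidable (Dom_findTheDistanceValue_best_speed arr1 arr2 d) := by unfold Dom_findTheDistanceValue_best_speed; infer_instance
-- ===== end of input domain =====

-- B replaces A's per-element bisect pair with one monotone two-pointer sweep over both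
-- sorted arrays (arr2 still sorted in place as in A; arr1 sorted into a copy).
-- Equivalence is about the RETURN value; both A and B sort arr2 in place and leave arr1 alone.

-- ===== PORT A =====
def findTheDistanceValue_best_speed (arr1 : List Int) (arr2 : List Int) (d : Int) : Int :=
  let a2 := PySem.List.sorted arr2 (fun y => y)
  arr1.foldl (fun ans val =>
    ans + (if PySem.List.bisectLeft a2 (val - d) = PySem.List.bisectRight a2 (val + d)
           then (1 : Int) else 0)) 0

-- ===== PORT B =====
-- the inner `while j < m and arr2[j] < x - d: j += 1` loop
-- (fuel-guarded structural recursion; fuel = len(arr2) always suffices from j ≤ len(arr2))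
def advJ (a2 : List Int) (lo : Int) (fuel : Nat) (j : Nat) : Nat :=
  match fuel with
  | 0 => j
  | fuel + 1 =>
    if h : j < a2.length then
      (if a2[j] < lo then advJ a2 lo fuel (j + 1) else j)
    else j

-- the `for x in a1` loop carrying (j, ans)
def sweepGo (a2 : List Int) (d : Int) : List Int → Nat → Int → Int
  | [], _, ans => ans
  | x :: rest, j, ans =>
    let j' := advJ a2 (x - d) a2.length j
    sweepGo a2 d rest j'
      (ans + (if j' = a2.length ∨ x + d < a2.getD j' 0 then (1 : Int) else 0))

def findTheDistanceValue_best_speed_alt (arr1 : List Int) (arr2 : List Int) (d : Int) : Int :=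
  let a2 := PySem.List.sorted arr2 (fun y => y)
  let a1 := PySem.List.sorted arr1 (fun y => y)
  sweepGo a2 d a1 0 0

-- ===== PRECONDITION & SPEC =====
-- For negative d (not a valid distance) when some x in arr1 has an arr2 element strictly
-- between x+d and x-d, A's bisect arithmetic fails to count such x, while B returns
-- len(arr1); B's value is intended: no element lies within a negative distance d of x.
def D_findTheDistanceValue_best_speed (arr1 : List Int) (arr2 : List Int) (d : Int) : Prop :=
  d < 0 ∧ ∃ x ∈ arr1, ∃ y ∈ arr2, x + d < y ∧ y < x - d
instance (arr1 : List Int) (arr2 : List Int) (d : Int) : Decidable (D_findTheDistanceValue_best_speed arr1 arr2 d) := by unfold D_findTheDistanceValue_best_speed; infer_instance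

def Spec_findTheDistanceValue_best_speed (arr1 : List Int) (arr2 : List Int) (d : Int) (out : Int) : Prop := ¬ D_findTheDistanceValue_best_speed arr1 arr2 d → out = findTheDistanceValue_best_speed_alt arr1 arr2 d
instance (arr1 : List Int) (arr2 : List Int) (d : Int) (out : Int) : Decidable (Spec_findTheDistanceValue_best_speed arr1 arr2 d out) := by unfold Spec_findTheDistanceValue_best_speed; infer_instance

def pvDiffWitness_findTheDistanceValue_best_speed : List Int × List Int × Int := ([0], [0], -1)
def pvDiffWitnessOut_findTheDistanceValue_best_speed : Int × Int := (0, 1)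

-- ===== CLAIM (what is proved, stated in full; the proofs are below) =====
def Claim_unchanged_findTheDistanceValue_best_speed : Prop := ∀ (arr1 : List Int) (arr2 : List Int) (d : Int), Dom_findTheDistanceValue_best_speed arr1 arr2 d → Spec_findTheDistanceValue_best_speed arr1 arr2 d (findTheDistanceValue_best_speed arr1 arr2 d)
def Claim_changed_findTheDistanceValue_best_speed : Prop := Dom_findTheDistanceValue_best_speed (pvDiffWitness_findTheDistanceValue_best_speed.1) (pvDiffWitness_findTheDistanceValue_best_speed.2.1) (pvDiffWitness_findTheDistanceValue_best_speed.2.2) ∧ D_findTheDistanceValue_best_speed (pvDiffWitness_findTheDistanceValue_best_speed.1) (pvDiffWitness_findTheDistanceValue_best_speed.2.1) (pvDiffWitness_findTheDistanceValue_best_speed.2.2) ∧ findTheDistanceValue_best_speed (pvDiffWitness_findTheDistanceValue_best_speed.1) (pvDiffWitness_findTheDistanceValue_best_speed.2.1) (pvDiffWitness_findTheDistanceValue_best_speed.2.2) = pvDiffWitnessOut_findTheDistanceValue_best_speed.1 ∧ findTheDistanceValue_best_speed_alt (pvDiffWitness_findTheDistanceValue_best_speed.1) (pvDiffWitness_findTheDistanceValue_best_speed.2.1)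 (pvDiffWitness_findTheDistanceValue_best_speed.2.2) = pvDiffWitnessOut_findTheDistanceValue_best_speed.2 ∧ pvDiffWitnessOut_findTheDistanceValue_best_speed.1 ≠ pvDiffWitnessOut_findTheDistanceValue_best_speed.2
def Claim_exact_findTheDistanceValue_best_speed : Prop := ∀ (arr1 : List Int) (arr2 : List Int) (d : Int), Dom_findTheDistanceValue_best_speed arr1 arr2 d → D_findTheDistanceValue_best_speed arr1 arr2 d → findTheDistanceValue_best_speed arr1 arr2 d ≠ findTheDistanceValue_best_speed_alt arr1 arr2 d

-- ===== LEMMAS AND PROOFS =====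

-- `hit d x y` : y is one of the values that makes A's two bisect results differ at x
def hitB (d x y : Int) : Bool :=
  (decide (x - d ≤ y) && decide (y ≤ x + d)) || (decide (x + d < y) && decide (y < x - d))

-- generic foldl-with-indicator characterisation
theorem foldl_add_g (g : Int → Int) : ∀ (l : List Int) (ans : Int),
    l.foldl (fun a v => a + g v) ans = ans + (l.map g).sum := by
  intro l
  induction l with
  | nil => intro ans; simp
  | cons x t ih => intro ans; simp [List.foldl, ih]; ring

-- A's per-element test on the sorted arr2
theorem keyLemma (a2 : List Int) (d x : Int) (hp : a2.Pairwise (fun a b => a ≤ b)) :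
    (PySem.List.bisectLeft a2 (x - d) = PySem.List.bisectRight a2 (x + d)) ↔
    (a2.all (fun y => !hitB d x y) = true) := by
  obtain ⟨hl1, hl2, hl3⟩ := PySem.List.bisectLeft_spec a2 (x - d) hp
  obtain ⟨hr1, hr2, hr3⟩ := PySem.List.bisectRight_spec a2 (x + d) hp
  set L := PySem.List.bisectLeft a2 (x - d) with hL
  set R := PySem.List.bisectRight a2 (x + d) with hR
  constructor
  · intro h
    simp only [List.all_eq_true, hitB]
    intro y hy
    obtain ⟨i, hi, rfl⟩ := List.mem_iff_getElem.mp hy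
    simp only [Bool.not_eq_true', Bool.or_eq_false_iff, Bool.and_eq_false_iff,
      decide_eq_false_iff_not, not_le, not_lt]
    by_cases hiL : i < L
    · have h1 := hl2 i hi hiL
      have h2 := hr2 i hi (h ▸ hiL)
      omega
    · have h1 := hl3 i hi (Nat.le_of_not_lt hiL)
      have h2 := hr3 i hi (h ▸ Nat.le_of_not_lt hiL)
      omega
  · intro h
    by_contra hne
    rcases Nat.lt_trichotomy L R with hlt | heq | hgt
    · have hLm : L < a2.length := Nat.lt_of_lt_of_le hlt hr1
      have h1 := hl3 L hLm (Nat.le_refl L)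
      have h2 := hr2 L hLm hlt
      have hmem : a2[L] ∈ a2 := List.getElem_mem hLm
      have := (List.all_eq_true.mp h) _ hmem
      simp only [hitB, Bool.not_eq_eq_eq_not, Bool.not_true, Bool.or_eq_false_iff,
        Bool.and_eq_false_iff, decide_eq_false_iff_not, not_le, not_lt] at this
      omega
    · exact hne heq
    · have hRm : R < a2.length := Nat.lt_of_lt_of_le hgt hl1
      have h1 := hl2 R hRm hgt
      have h2 := hr3 R hRm (Nat.le_refl R)
      have hmem : a2[R] ∈ a2 := List.getElem_mem hRm
      have := (List.all_eq_true.mp h) _ hmem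
      simp only [hitB, Bool.not_eq_eq_eq_not, Bool.not_true, Bool.or_eq_false_iff,
        Bool.and_eq_false_iff, decide_eq_false_iff_not, not_le, not_lt] at this
      omega

theorem A_eq (arr1 arr2 : List Int) (d : Int) :
    findTheDistanceValue_best_speed arr1 arr2 d =
      ((arr1.map (fun x =>
        if (PySem.List.sorted arr2 (fun y => y)).all (fun y => !hitB d x y) then (1 : Int) else 0)).sum) := by
  unfold findTheDistanceValue_best_speed
  rw [foldl_add_g]
  simp only [zero_add]
  congr 1
  apply List.map_congr_left
  intro v _
  rw [if_congr (keyLemma _ d v (PySem.List.sorted_pairwise arr2 (fun y => y))) rfl rfl]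

-- advJ specs
theorem advJ_new (a2 : List Int) (lo : Int) :
    ∀ (fuel j : Nat) (i : Nat), (h : i < a2.length) → j ≤ i → i < advJ a2 lo fuel j →
      a2[i] < lo := by
  intro fuel
  induction fuel with
  | zero => intro j i hi hji hlt; simp [advJ] at hlt; omega
  | succ fuel ih =>
    intro j i hi hji hlt
    simp only [advJ] at hlt
    by_cases hj : j < a2.length
    · rw [dif_pos hj] at hlt
      by_cases ha : a2[j] < lo
      · rw [if_pos ha] at hlt
        rcases Nat.eq_or_lt_of_le hji with rfl | hji'
        · exact ha
        · exact ih (j + 1) i hi hji' hlt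
      · rw [if_neg ha] at hlt; omega
    · rw [dif_neg hj] at hlt; omega

theorem advJ_le (a2 : List Int) (lo : Int) :
    ∀ (fuel j : Nat), j ≤ a2.length → advJ a2 lo fuel j ≤ a2.length := by
  intro fuel
  induction fuel with
  | zero => intro j hj; simpa [advJ] using hj
  | succ fuel ih =>
    intro j hj
    simp only [advJ]
    split
    · split
      · exact ih (j + 1) (by omega)
      · exact hj
    · exact hj

theorem advJ_post (a2 : List Int) (lo : Int) :
    ∀ (fuel j : Nat), a2.length ≤ fuel + j → advJ a2 lo fuel j < a2.length →
      lo ≤ a2.getD (advJ a2 lo fuel j) 0 := by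
  intro fuel
  induction fuel with
  | zero => intro j hf h; simp only [advJ] at h ⊢; omega
  | succ fuel ih =>
    intro j hf h
    simp only [advJ] at h ⊢
    by_cases hj : j < a2.length
    · rw [dif_pos hj] at h ⊢
      by_cases ha : a2[j] < lo
      · rw [if_pos ha] at h ⊢
        exact ih (j + 1) (by omega) h
      · rw [if_neg ha] at h ⊢
        rw [List.getD_eq_getElem a2 0 h]
        omega
    · rw [dif_neg hj] at h; omega

-- sweep characterisation outside the open-gap region
theorem sweepGo_eq (a2 : List Int) (d : Int) (hp : a2.Pairwise (fun a b => a ≤ b)) :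
    ∀ (a1 : List Int) (j : Nat) (ans : Int),
    a1.Pairwise (fun a b => a ≤ b) →
    (∀ x ∈ a1, d < 0 → ∀ y ∈ a2, ¬(x + d < y ∧ y < x - d)) →
    j ≤ a2.length →
    (∀ i, (h : i < a2.length) → i < j → ∀ x ∈ a1, a2[i] < x - d) →
    sweepGo a2 d a1 j ans =
      ans + (a1.map (fun x => if a2.all (fun y => !hitB d x y) then (1 : Int) else 0)).sum := by
  intro a1
  induction a1 with
  | nil => intro j ans _ _ _ _; simp [sweepGo]
  | cons x rest ih =>
    intro j ans hps hOK hjle hinv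
    have hmono := List.pairwise_iff_getElem.mp hp
    set j' := advJ a2 (x - d) a2.length j with hj'
    have hj'le : j' ≤ a2.length := advJ_le a2 (x - d) a2.length j hjle
    -- everything before j' is < x - d
    have hbefore : ∀ i, (h : i < a2.length) → i < j' → a2[i] < x - d := by
      intro i hi hij'
      by_cases hij : i < j
      · exact hinv i hi hij x (List.mem_cons_self)
      · exact advJ_new a2 (x - d) a2.length j i hi (Nat.le_of_not_lt hij) hij'
    have hOKx : d < 0 → ∀ y ∈ a2, ¬(x + d < y ∧ y < x - d) :=
      fun hd => hOK x List.mem_cons_self hd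
    -- the per-x indicator
    have hcnt : (if j' = a2.length ∨ x + d < a2.getD j' 0 then (1 : Int) else 0) =
        (if a2.all (fun y => !hitB d x y) then (1 : Int) else 0) := by
      by_cases hc : j' = a2.length ∨ x + d < a2.getD j' 0
      · rw [if_pos hc, if_pos]
        simp only [List.all_eq_true, hitB]
        intro y hy
        obtain ⟨i, hi, rfl⟩ := List.mem_iff_getElem.mp hy
        have hnot2 : ¬(x + d < a2[i] ∧ a2[i] < x - d) := by
          intro hband
          have hd : d < 0 := by omega
          exact hOKx hd a2[i] (List.getElem_mem hi) hband
        simp only [Bool.not_eq_true', Bool.or_eq_false_iff, Bool.and_eq_false_iff,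
          decide_eq_false_iff_not, not_le, not_lt]
        by_cases hj'm : j' = a2.length
        · have := hbefore i hi (by omega)
          omega
        · have hj'lt : j' < a2.length := Nat.lt_of_le_of_ne hj'le hj'm
          have hc' : x + d < a2[j'] := by
            rcases hc with hc | hc
            · exact absurd hc hj'm
            · rwa [List.getD_eq_getElem a2 0 hj'lt] at hc
          by_cases hij' : i < j'
          · have := hbefore i hi hij'
            omega
          · have hge : a2[j'] ≤ a2[i] := by
              rcases Nat.eq_or_lt_of_le (Nat.le_of_not_lt hij') with heq | hlt
              · exact le_of_eq (by congr 1)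
              · exact hmono j' i hj'lt hi hlt
            omega
      · rw [if_neg hc, if_neg]
        push Not at hc
        obtain ⟨hne, hle⟩ := hc
        have hj'm : j' < a2.length := Nat.lt_of_le_of_ne hj'le hne
        rw [List.getD_eq_getElem a2 0 hj'm] at hle
        have hgelo : x - d ≤ a2[j'] := by
          have h5 := advJ_post a2 (x - d) a2.length j (by omega) (hj' ▸ hj'm)
          rw [← hj'] at h5
          rwa [List.getD_eq_getElem a2 0 hj'm] at h5
        simp only [List.all_eq_true, not_forall]
        refine ⟨a2[j'], ⟨List.getElem_mem hj'm, ?_⟩⟩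
        simp only [hitB, Bool.not_eq_true', Bool.or_eq_false_iff,
          Bool.and_eq_false_iff, decide_eq_false_iff_not, not_le, not_lt]
        omega
    -- step the recursion
    have hpr : rest.Pairwise (fun a b => a ≤ b) := hps.tail
    have hxle : ∀ z ∈ rest, x ≤ z := fun z hz => (List.pairwise_cons.mp hps).1 z hz
    have := ih j' (ans + (if j' = a2.length ∨ x + d < a2.getD j' 0 then (1 : Int) else 0))
      hpr
      (fun z hz hd y hy => hOK z (List.mem_cons_of_mem x hz) hd y hy)
      hj'le
      (by
        intro i hi hij' z hz
        have hb := hbefore i hi hij'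
        have := hxle z hz
        omega)
    simp only [sweepGo]
    rw [this, hcnt]
    simp [List.map, List.sum_cons]
    ring
  
-- for negative d the sweep counts every element
theorem sweepGo_neg (a2 : List Int) (d : Int) (hd : d < 0) :
    ∀ (a1 : List Int) (j : Nat) (ans : Int), j ≤ a2.length →
    sweepGo a2 d a1 j ans = ans + (a1.length : Int) := by
  intro a1
  induction a1 with
  | nil => intro j ans _; simp [sweepGo]
  | cons x rest ih =>
    intro j ans hj
    have hj'le : advJ a2 (x - d) a2.length j ≤ a2.length := advJ_le a2 (x - d) a2.length j hj
    have hone : (if advJ a2 (x - d) a2.length j = a2.length ∨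
        x + d < a2.getD (advJ a2 (x - d) a2.length j) 0 then (1 : Int) else 0) = 1 := by
      by_cases hm : advJ a2 (x - d) a2.length j = a2.length
      · rw [if_pos (Or.inl hm)]
      · have hj'm : advJ a2 (x - d) a2.length j < a2.length := Nat.lt_of_le_of_ne hj'le hm
        have hpost := advJ_post a2 (x - d) a2.length j (by omega) hj'm
        rw [if_pos (Or.inr (by omega))]
    simp only [sweepGo]
    rw [ih _ _ hj'le, hone]
    simp [List.length_cons]
    ring

-- indicator sums are bounded by the length, strictly when one indicator is 0
theorem sum_ind_le (f : Int → Int) (hf : ∀ z, f z ≤ 1) :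
    ∀ l : List Int, (l.map f).sum ≤ (l.length : Int) := by
  intro l
  induction l with
  | nil => simp
  | cons x t ih => simp [List.map, List.sum_cons]; have := hf x; omega

theorem sum_ind_lt (f : Int → Int) (hf : ∀ z, f z ≤ 1) (x : Int) :
    ∀ l : List Int, x ∈ l → f x ≤ 0 → (l.map f).sum < (l.length : Int) := by
  intro l
  induction l with
  | nil => intro h; simp at h
  | cons a t ih =>
    intro hmem hfx
    simp [List.map, List.sum_cons, List.length_cons]
    rcases List.mem_cons.mp hmem with rfl | ht
    · have := sum_ind_le f hf t; omega
    · have := ih ht hfx; have := hf a; omega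

-- ===== VERDICT (by name: the statement is the Claim_ definition above) =====
theorem findTheDistanceValue_best_speed_spec : Claim_unchanged_findTheDistanceValue_best_speed := by
  intro arr1 arr2 d _ hnD
  unfold D_findTheDistanceValue_best_speed at hnD
  push Not at hnD
  rw [A_eq]
  unfold findTheDistanceValue_best_speed_alt
  set a2 := PySem.List.sorted arr2 (fun y => y) with ha2
  set a1 := PySem.List.sorted arr1 (fun y => y) with ha1
  rw [sweepGo_eq a2 d (PySem.List.sorted_pairwise arr2 (fun y => y)) a1 0 0
      (PySem.List.sorted_pairwise arr1 (fun y => y))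
      (by
        intro x hx hd y hy hband
        have h5 := hnD hd x ((PySem.List.mem_sorted arr1 (fun y => y) false x).mp hx) y
          ((PySem.List.mem_sorted arr2 (fun y => y) false y).mp hy) hband.1
        omega)
      (Nat.zero_le _)
      (by intro i hi hij; omega)]
  rw [zero_add]
  exact (List.Perm.sum_eq (List.Perm.map _ (PySem.List.sorted_perm arr1 (fun y => y) false))).symm

theorem findTheDistanceValue_best_speed_changed : Claim_changed_findTheDistanceValue_best_speed := by
  unfold Claim_changed_findTheDistanceValue_best_speed; decide

theorem findTheDistanceValue_best_speed_tight : Claim_exact_findTheDistanceValue_best_speed := by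
  intro arr1 arr2 d _ hD
  obtain ⟨hd, x, hx, y, hy, h1, h2⟩ := hD
  rw [A_eq]
  unfold findTheDistanceValue_best_speed_alt
  rw [sweepGo_neg _ d hd _ 0 0 (Nat.zero_le _), zero_add, PySem.List.length_sorted]
  apply ne_of_lt
  apply sum_ind_lt _ (fun z => by split <;> omega) x _ hx
  have hy2 : y ∈ PySem.List.sorted arr2 (fun y => y) := (PySem.List.mem_sorted arr2 (fun y => y) false y).mpr hy
  have hhit : hitB d x y = true := by
    simp only [hitB, Bool.or_eq_true, Bool.and_eq_true, decide_eq_true_eq]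
    right
    exact ⟨h1, h2⟩
  have h0 : ((PySem.List.sorted arr2 (fun y => y)).all (fun y => !hitB d x y)) = false := by
    rw [List.all_eq_false]
    exact ⟨y, hy2, by simp [hhit]⟩
  simp [h0]
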